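-- pv_equiv track=rewrite | github.com/Her0n24/AAM | test_code/CMIP6_HadGEM3_GC31/event_composite_linear_fit_elnino_only_ensemble_mean.py | _rolling_tick_labels
-- ===== SOURCE A (Python) =====
-- def _rolling_tick_labels(window: int, n_bins: int = 12) -> list[str]:
--     """Return month-window labels for axis ticks (e.g., DJF, JFM, FMA for window=3)."""
--     month_initials = ["J", "F", "M", "A", "M", "J", "J", "A", "S", "O", "N", "D"]
--     if window <= 1:
--         return [f"M{m:02d}" for m in range(1, n_bins + 1)]
--     left = window // 2
--     right = window - left - 1
--     labels = []
--     for center in range(n_bins):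
--         parts = [month_initials[(center + off) % 12] for off in range(-left, right + 1)]
--         labels.append("".join(parts))
--     return labels
-- ===== SOURCE B (Python) =====
-- def _rolling_tick_labels(window: int, n_bins: int = 12) -> list[str]:
--     """Return month-window labels for axis ticks (e.g., DJF, JFM, FMA for window=3)."""
--     month_initials = ["J", "F", "M", "A", "M", "J", "J", "A", "S", "O", "N", "D"]
--     if window <= 1:
--         return [f"M{m:02d}" for m in range(1, n_bins + 1)]
--     if n_bins <= 0:
--         return []
--     left = window // 2
--     # labels are periodic with period 12: memoise the 12 possible labels once,
--     # each as one contiguous slice of a repeated month table, then tile.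
--     base = month_initials * (window // 12 + 2)
--     table = ["".join(base[(m - left) % 12:(m - left) % 12 + window]) for m in range(12)]
--     return [table[c % 12] for c in range(n_bins)]
-- ===== Notes on version B (the rewrite author's own statement) =====
-- stated objective: faster
-- what changed: Exploits the 12-periodicity of the labels: memoises the 12 possible window labels once (each as one contiguous slice of a repeated month table, replacing A's per-offset modulo inner loop) and then tiles them across the n_bins centers with table[c % 12].
import Mathlib
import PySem

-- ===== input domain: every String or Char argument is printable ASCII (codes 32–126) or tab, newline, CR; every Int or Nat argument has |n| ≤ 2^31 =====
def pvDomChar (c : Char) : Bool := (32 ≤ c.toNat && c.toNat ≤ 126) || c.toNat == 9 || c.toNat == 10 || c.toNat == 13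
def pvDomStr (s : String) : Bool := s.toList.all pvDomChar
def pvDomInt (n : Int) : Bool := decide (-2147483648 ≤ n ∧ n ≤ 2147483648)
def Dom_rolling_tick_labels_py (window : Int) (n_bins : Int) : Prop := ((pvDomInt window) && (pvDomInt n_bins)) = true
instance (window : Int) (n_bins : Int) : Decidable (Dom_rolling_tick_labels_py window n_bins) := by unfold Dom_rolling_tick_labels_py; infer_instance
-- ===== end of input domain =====

-- B memoises the 12 possible labels once (labels are 12-periodic in the center) and tiles
-- them with table[c % 12], instead of A's per-center per-offset modulo indexing loop.

-- ===== PORT A =====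
-- f"M{m:02d}": hand port, exact for 0 ≤ m (the only calls have m ≥ 1)
def pvFmtM2 (m : Int) : String :=
  if m < 10 then "M0" ++ PySem.Int.toStr m else "M" ++ PySem.Int.toStr m

def pvMonthsA : List String := ["J", "F", "M", "A", "M", "J", "J", "A", "S", "O", "N", "D"]

def rolling_tick_labels_py (window : Int) (n_bins : Int) : List String :=
  if window ≤ 1 then
    (PySem.List.pyRange 1 (n_bins + 1) 1).map (fun m => pvFmtM2 m)
  else
    let left := PySem.Int.floordiv window 2
    let right := window - left - 1
    (PySem.List.pyRange 0 n_bins 1).foldl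
      (fun labels center =>
        labels ++ [PySem.Str.join ""
          ((PySem.List.pyRange (-left) (right + 1) 1).map
            (fun off => PySem.List.pyGetD pvMonthsA (PySem.Int.mod (center + off) 12) ""))]) []

-- ===== PORT B =====
def pvMonthsB : List String := ["J", "F", "M", "A", "M", "J", "J", "A", "S", "O", "N", "D"]

def rolling_tick_labels_py_alt (window : Int) (n_bins : Int) : List String :=
  if window ≤ 1 then
    (PySem.List.pyRange 1 (n_bins + 1) 1).map (fun m => pvFmtM2 m)
  else if n_bins ≤ 0 then []
  else
    let left := PySem.Int.floordiv window 2
    let base := PySem.List.pyRepeat pvMonthsB (PySem.Int.floordiv window 12 + 2)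
    let table := (PySem.List.pyRange 0 12 1).map (fun m =>
      PySem.Str.join ""
        (PySem.List.slice base (some (PySem.Int.mod (m - left) 12))
          (some (PySem.Int.mod (m - left) 12 + window))))
    (PySem.List.pyRange 0 n_bins 1).map (fun c =>
      PySem.List.pyGetD table (PySem.Int.mod c 12) "")

-- ===== PRECONDITION & SPEC =====
def Spec_rolling_tick_labels_py (window : Int) (n_bins : Int) (out : List String) : Prop := out = rolling_tick_labels_py_alt window n_bins
instance (window : Int) (n_bins : Int) (out : List String) : Decidable (Spec_rolling_tick_labels_py window n_bins out) := by unfold Spec_rolling_tick_labels_py; infer_instance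

-- ===== CLAIM =====
def Claim_equal_rolling_tick_labels_py : Prop := ∀ (window : Int) (n_bins : Int), Dom_rolling_tick_labels_py window n_bins → Spec_rolling_tick_labels_py window n_bins (rolling_tick_labels_py window n_bins)

-- ===== LEMMAS AND PROOFS =====

-- the repeated table is periodic: element j of L*n is element (j % |L|) of L
theorem pv_getD_flatten_replicate {α : Type} (L : List α) (d : α) (n j : Nat)
    (hj : j < n * L.length) :
    (List.flatten (List.replicate n L)).getD j d = L.getD (j % L.length) d := by
  induction n generalizing j with
  | zero => simp at hj
  | succ n ih =>
    rw [List.replicate_succ, List.flatten_cons]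
    by_cases h : j < L.length
    · rw [List.getD_append _ _ _ _ h, Nat.mod_eq_of_lt h]
    · rw [Nat.not_lt] at h
      rw [List.getD_append_right _ _ _ _ h, Nat.mod_eq_sub_mod h]
      apply ih
      have : (n+1) * L.length = n * L.length + L.length := by ring
      omega

-- a full in-range drop/take slice, written elementwise
theorem pv_drop_take_eq_map_range {α : Type} (xs : List α) (d : α) (s w : Nat)
    (h : s + w ≤ xs.length) :
    (xs.drop s).take w = (List.range w).map (fun k => xs.getD (s + k) d) := by
  apply List.ext_getElem
  · simp; omega
  · intro i h1 h2
    have hi : i < w := by simpa using h2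
    have hsw : s + i < xs.length := by omega
    simp only [List.getElem_take, List.getElem_drop, List.getElem_map, List.getElem_range,
      List.getD_eq_getElem _ _ hsw]

-- per-center: A's offset-by-offset parts list equals one slice of the repeated table
-- starting at (c - left) % 12
theorem pv_parts_eq (w : Int) (hw : 1 < w) (c : Int) :
    (PySem.List.pyRange (-(PySem.Int.floordiv w 2))
        (w - PySem.Int.floordiv w 2 - 1 + 1) 1).map
      (fun off => PySem.List.pyGetD pvMonthsA (PySem.Int.mod (c + off) 12) "")
    = PySem.List.slice (PySem.List.pyRepeat pvMonthsB (PySem.Int.floordiv w 12 + 2))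
        (some (PySem.Int.mod (c - PySem.Int.floordiv w 2) 12))
        (some (PySem.Int.mod (c - PySem.Int.floordiv w 2) 12 + w)) := by
  have h12 : (0:Int) < 12 := by norm_num
  have h2 : (0:Int) < 2 := by norm_num
  rw [PySem.Int.floordiv_eq_ediv_of_pos h12, PySem.Int.floordiv_eq_ediv_of_pos h2,
    PySem.Int.mod_eq_emod_of_pos h12]
  set left : Int := w / 2 with hleft
  set s : Int := (c - left) % 12 with hs
  have hs0 : 0 ≤ s := Int.emod_nonneg _ (by norm_num)
  have hs12 : s < 12 := Int.emod_lt_of_pos _ h12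
  have hdiv : 12 * (w / 12) + w % 12 = w := Int.mul_ediv_add_emod w 12
  have hmod : 0 ≤ w % 12 ∧ w % 12 < 12 := ⟨Int.emod_nonneg _ (by norm_num), Int.emod_lt_of_pos _ h12⟩
  have hq0 : 0 ≤ w / 12 := by omega
  have hlen : (PySem.List.pyRepeat pvMonthsB (w / 12 + 2)).length = (w / 12 + 2).toNat * 12 := by
    simp [PySem.List.pyRepeat, pvMonthsB]
  have hbound : s.toNat + w.toNat ≤ (w / 12 + 2).toNat * 12 := by omega
  rw [PySem.List.slice_toNat _ hs0 (by omega)]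
  have htn : (s + w).toNat - s.toNat = w.toNat := by omega
  rw [htn, pv_drop_take_eq_map_range _ "" _ _ (by rw [hlen]; omega)]
  rw [PySem.List.pyRange_one]
  have hcnt : (w - left - 1 + 1 - -left).toNat = w.toNat := by omega
  rw [hcnt, List.map_map]
  apply List.map_congr_left
  intro k hk
  have hkw : k < w.toNat := List.mem_range.mp hk
  have hmB : pvMonthsB = pvMonthsA := rfl
  have hLlen : pvMonthsA.length = 12 := rfl
  simp only [Function.comp_apply]
  rw [PySem.Int.mod_eq_emod_of_pos h12]
  set i : Int := (c + (-left + (k : Int))) % 12 with hi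
  have hi0 : 0 ≤ i := Int.emod_nonneg _ (by norm_num)
  have hi12 : i < 12 := Int.emod_lt_of_pos _ h12
  rw [PySem.List.pyGetD_eq_getElem _ _ hi0 (by rw [hLlen]; exact_mod_cast hi12),
    ← List.getD_eq_getElem _ ""]
  have hjlt : s.toNat + k < (w / 12 + 2).toNat * 12 := by omega
  rw [show PySem.List.pyRepeat pvMonthsB (w / 12 + 2)
        = List.flatten (List.replicate (w / 12 + 2).toNat pvMonthsA) by
      simp [PySem.List.pyRepeat, hmB]]
  rw [pv_getD_flatten_replicate pvMonthsA "" _ _ (by rw [hLlen]; exact hjlt)]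
  congr 1
  rw [hLlen]
  have harith : i = (s + (k : Int)) % 12 := by
    rw [hi, hs]
    rw [Int.emod_add_emod]
    ring_nf
  omega

-- ===== VERDICT =====
theorem rolling_tick_labels_py_spec : Claim_equal_rolling_tick_labels_py := by
  intro window n_bins _
  unfold Spec_rolling_tick_labels_py rolling_tick_labels_py rolling_tick_labels_py_alt
  by_cases h : window ≤ 1
  · simp [h]
  · simp only [h, if_false]
    by_cases hn : n_bins ≤ 0
    · simp [hn, PySem.List.pyRange_one_eq_nil hn]
    · simp only [hn, if_false]
      rw [PySem.List.foldl_append_singleton_eq_map, List.nil_append]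
      apply List.map_congr_left
      intro c hc
      have hc0 : 0 ≤ c := (PySem.List.mem_pyRange_one.mp hc).1
      have h12 : (0:Int) < 12 := by norm_num
      have hm0 : 0 ≤ PySem.Int.mod c 12 := by
        rw [PySem.Int.mod_eq_emod_of_pos h12]; exact Int.emod_nonneg _ (by norm_num)
      have hm12 : PySem.Int.mod c 12 < 12 := by
        rw [PySem.Int.mod_eq_emod_of_pos h12]; exact Int.emod_lt_of_pos _ h12
      rw [PySem.List.pyGetD_map_pyRange_of_nonneg _ _ _ _ hm0 hm12]
      rw [pv_parts_eq window (by omega) c]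
      -- the memoised start index (c%12 - left)%12 equals (c - left)%12
      have hst : PySem.Int.mod (PySem.Int.mod c 12 - PySem.Int.floordiv window 2) 12
          = PySem.Int.mod (c - PySem.Int.floordiv window 2) 12 := by
        rw [PySem.Int.mod_eq_emod_of_pos h12, PySem.Int.mod_eq_emod_of_pos h12,
          PySem.Int.mod_eq_emod_of_pos h12]
        omega
      rw [hst]
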